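-- pv_equiv track=rewrite | github.com/alancast/LeetCodeProblems | python/medium/2221_find_triangular_sum.py | triangularSum_brute
-- ===== SOURCE A (Python) =====
-- from typing import List
--
-- def triangularSum_brute(nums: List[int]) -> int:
--     end = len(nums)
--
--     while end > 0:
--         for i in range(end-1):
--             nums[i] += nums[i+1]
--             nums[i] %= 10
--
--         end -= 1
--
--     return nums[0]
-- ===== SOURCE B (Python) =====
-- from typing import List
--
-- # Pascal's triangle rows mod p for p = 2 and p = 5 (row m, column i: C(m, i) % p).
-- _T2 = [[1, 0],
--        [1, 1]]
-- _T5 = [[1, 0, 0, 0, 0],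
--        [1, 1, 0, 0, 0],
--        [1, 2, 1, 0, 0],
--        [1, 3, 3, 1, 0],
--        [1, 4, 1, 4, 1]]
--
--
-- def _binom_mod(m: int, i: int, p: int, table) -> int:
--     # Lucas's theorem: C(m, i) mod p is the product of C(m_d, i_d) mod p
--     # over the base-p digits m_d, i_d of m and i.
--     r = 1
--     while m > 0 or i > 0:
--         r = r * table[m % p][i % p] % p
--         m //= p
--         i //= p
--     return r
--
--
-- def triangularSum_brute(nums: List[int]) -> int:
--     n = len(nums)
--     if n == 1:
--         return nums[0]
--     m = n - 1
--     total = 0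
--     for i, v in enumerate(nums):
--         c2 = _binom_mod(m, i, 2, _T2)       # C(m, i) mod 2
--         c5 = _binom_mod(m, i, 5, _T5)       # C(m, i) mod 5
--         c10 = (6 * c5 + 5 * c2) % 10        # CRT: C(m, i) mod 10
--         total += c10 * v
--     return total % 10
-- ===== Notes on version B (the rewrite author's own statement) =====
-- stated objective: faster
-- what changed: Replaces the quadratic repeated adjacent-sum collapse by the closed form sum C(n-1,i)*nums[i] mod 10, computing each binomial coefficient mod 10 via Lucas's theorem mod 2 and mod 5 combined by CRT.
import Mathlib
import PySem

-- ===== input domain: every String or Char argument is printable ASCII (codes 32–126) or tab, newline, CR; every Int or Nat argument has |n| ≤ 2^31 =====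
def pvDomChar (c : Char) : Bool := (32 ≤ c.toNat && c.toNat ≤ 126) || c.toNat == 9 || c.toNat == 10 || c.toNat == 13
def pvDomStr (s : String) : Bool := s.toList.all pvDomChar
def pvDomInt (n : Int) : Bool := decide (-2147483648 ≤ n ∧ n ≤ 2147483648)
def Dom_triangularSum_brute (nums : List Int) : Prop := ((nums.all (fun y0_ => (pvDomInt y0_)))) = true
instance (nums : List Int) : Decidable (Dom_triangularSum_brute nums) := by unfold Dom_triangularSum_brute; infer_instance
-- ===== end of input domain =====

-- B replaces A's quadratic repeated adjacent collapse by the closed form (sum C(n-1,i)*nums[i]) mod 10,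
-- with the binomials mod 10 obtained from Lucas's theorem (mod 2 and mod 5) and CRT; objective: faster.
-- A mutates nums in place; the equivalence proved here is about the RETURN value only.

-- ===== PORT A =====
-- one inner pass 'for i in range(e): nums[i] += nums[i+1]; nums[i] %= 10'
-- (indices are in range whenever e < len(nums), which holds at every call below; exact there)
def pvAInner (l : List Int) (e : Nat) : List Int :=
  (List.range e).foldl
    (fun l i => l.set i (PySem.Int.mod (l.getD i 0 + l.getD (i+1) 0) 10)) l

-- the 'while end > 0' loop, structural recursion on end
def pvALoop (l : List Int) : Nat → List Int
  | 0 => l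
  | e + 1 => pvALoop (pvAInner l e) e

def triangularSum_brute (nums : List Int) : Int :=
  (pvALoop nums nums.length).getD 0 0  -- 'return nums[0]'; the IndexError on [] is excluded by Pre_

-- ===== PORT B =====
def pvT2 : List (List Nat) := [[1,0],[1,1]]
def pvT5 : List (List Nat) := [[1,0,0,0,0],[1,1,0,0,0],[1,2,1,0,0],[1,3,3,1,0],[1,4,1,4,1]]

-- the 'while m > 0 or i > 0' loop of _binom_mod; the '2 ≤ p' conjunct is a termination
-- guard only (the function is invoked solely with p = 2 and p = 5, where it is exact)
def pvBinomModGo (r m i p : Nat) (tbl : List (List Nat)) : Nat :=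
  if h : 2 ≤ p ∧ (0 < m ∨ 0 < i) then
    pvBinomModGo (r * ((tbl.getD (m % p) []).getD (i % p) 0) % p) (m / p) (i / p) p tbl
  else r
termination_by m + i
decreasing_by
  rcases h with ⟨h2, hmi⟩
  rcases hmi with hm | hi
  · have h1 := Nat.div_lt_self hm (by omega : 1 < p)
    have h2' := Nat.div_le_self i p; omega
  · have h1 := Nat.div_lt_self hi (by omega : 1 < p)
    have h2' := Nat.div_le_self m p; omega

def pvBinomMod (m i p : Nat) (tbl : List (List Nat)) : Nat := pvBinomModGo 1 m i p tbl

def triangularSum_brute_alt (nums : List Int) : Int :=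
  if nums.length = 1 then nums.getD 0 0
  else
    let m := nums.length - 1
    let total := (PySem.List.enumerate nums).foldl (fun total iv =>
      -- iv.1 is the enumerate index (always ≥ 0, so .toNat is exact)
      let c2 := pvBinomMod m iv.1.toNat 2 pvT2
      let c5 := pvBinomMod m iv.1.toNat 5 pvT5
      let c10 := (6 * c5 + 5 * c2) % 10
      total + (c10 : Int) * iv.2) 0
    PySem.Int.mod total 10

-- ===== PRECONDITION & SPEC =====
-- Pre_ excludes only the empty list, on which A raises IndexError at 'return nums[0]'.
def Pre_triangularSum_brute (nums : List Int) : Prop := nums ≠ []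
instance (nums : List Int) : Decidable (Pre_triangularSum_brute nums) := by
  unfold Pre_triangularSum_brute; infer_instance
def pvWitness_triangularSum_brute : List Int := [3, 1, 4, 1, 5]

def Spec_triangularSum_brute (nums : List Int) (out : Int) : Prop :=
  out = triangularSum_brute_alt nums
instance (nums : List Int) (out : Int) : Decidable (Spec_triangularSum_brute nums out) := by
  unfold Spec_triangularSum_brute; infer_instance

-- ===== CLAIM (what is proved, stated in full; the proofs are below) =====
def Claim_equal_triangularSum_brute : Prop :=
  ∀ (nums : List Int), Dom_triangularSum_brute nums → Pre_triangularSum_brute nums →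
    Spec_triangularSum_brute nums (triangularSum_brute nums)

-- ===== LEMMAS AND PROOFS =====

-- the weighted sum both programs compute (weights: binomial row n-1)
def pvS (m : Nat) (l : List Int) : Int :=
  ∑ i ∈ Finset.range (m+1), ((m.choose i : Int) * l.getD i 0)

theorem pvAInner_succ (l : List Int) (e : Nat) :
    pvAInner l (e+1) = (pvAInner l e).set e
      (PySem.Int.mod ((pvAInner l e).getD e 0 + (pvAInner l e).getD (e+1) 0) 10) := by
  simp [pvAInner, List.range_succ]

theorem pvAInner_length (l : List Int) (e : Nat) : (pvAInner l e).length = l.length := by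
  induction e with
  | zero => simp [pvAInner]
  | succ e ih => rw [pvAInner_succ]; simp [ih]

theorem pvAInner_getD (l : List Int) (e : Nat) (he : e ≤ l.length) (j : Nat) :
    (pvAInner l e).getD j 0 =
      if j < e then PySem.Int.mod (l.getD j 0 + l.getD (j+1) 0) 10 else l.getD j 0 := by
  induction e generalizing j with
  | zero => simp [pvAInner]
  | succ e ih =>
    have he' : e ≤ l.length := by omega
    rw [pvAInner_succ]
    have hlen : (pvAInner l e).length = l.length := pvAInner_length l e
    have hge : (pvAInner l e).getD e 0 = l.getD e 0 := by rw [ih he']; simp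
    have hge1 : (pvAInner l e).getD (e+1) 0 = l.getD (e+1) 0 := by rw [ih he']; simp
    rw [hge, hge1]
    by_cases hje : j = e
    · subst hje
      rw [List.getD_eq_getElem?_getD, List.getElem?_set_self (by omega)]
      simp
    · rw [List.getD_eq_getElem?_getD, List.getElem?_set_ne (by omega)]
      rw [← List.getD_eq_getElem?_getD, ih he']
      by_cases hj : j < e
      · simp [hj, show j < e+1 by omega]
      · simp [hj, show ¬ j < e+1 by omega]

theorem pascal_sum (m : Nat) (g : Nat → Int) :
    ∑ i ∈ Finset.range (m+2), (((m+1).choose i : Int) * g i)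
      = ∑ i ∈ Finset.range (m+1), ((m.choose i : Int) * (g i + g (i+1))) := by
  have h1 : ∑ i ∈ Finset.range (m+2), (((m+1).choose i : Int) * g i)
      = (∑ i ∈ Finset.range (m+1), (((m+1).choose (i+1) : Int) * g (i+1))) + ((m+1).choose 0 : Int) * g 0 :=
    Finset.sum_range_succ' _ (m+1)
  have h2 : ∑ i ∈ Finset.range (m+2), ((m.choose i : Int) * g i)
      = (∑ i ∈ Finset.range (m+1), ((m.choose (i+1) : Int) * g (i+1))) + (m.choose 0 : Int) * g 0 :=
    Finset.sum_range_succ' _ (m+1)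
  have h3 : ∑ i ∈ Finset.range (m+2), ((m.choose i : Int) * g i)
      = ∑ i ∈ Finset.range (m+1), ((m.choose i : Int) * g i) := by
    rw [Finset.sum_range_succ]
    simp
  rw [h1]
  have h4 : ∀ i, (((m+1).choose (i+1) : Int)) = (m.choose i : Int) + (m.choose (i+1) : Int) := by
    intro i; rw [Nat.choose_succ_succ]; push_cast; ring
  simp only [h4, add_mul, Finset.sum_add_distrib]
  have h5 : ∑ i ∈ Finset.range (m+1), ((m.choose (i+1) : Int) * g (i+1))
      = (∑ i ∈ Finset.range (m+1), ((m.choose i : Int) * g i)) - (m.choose 0 : Int) * g 0 := by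
    rw [← h3, h2]; ring
  rw [h5]
  simp only [mul_add, Finset.sum_add_distrib]
  simp
  ring

theorem pvS_inner (l : List Int) (e : Nat) (he : e + 2 ≤ l.length) :
    PySem.Int.mod (pvS (e+1) (pvAInner l (e+2))) 10 = PySem.Int.mod (pvS (e+2) l) 10 := by
  have hmod : ∀ x : Int, PySem.Int.mod x 10 = x % 10 := fun x =>
    PySem.Int.mod_eq_emod_of_pos (by norm_num)
  have h1 : pvS (e+1) (pvAInner l (e+2))
      = ∑ i ∈ Finset.range (e+2), (((e+1).choose i : Int) * ((l.getD i 0 + l.getD (i+1) 0) % 10)) := by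
    unfold pvS
    refine Finset.sum_congr rfl fun i hi => ?_
    rw [pvAInner_getD l (e+2) he i]
    rw [if_pos (Finset.mem_range.mp hi), hmod]
  rw [hmod, hmod, h1]
  rw [Finset.sum_int_mod]
  have h2 : ∀ i, (((e+1).choose i : Int) * ((l.getD i 0 + l.getD (i+1) 0) % 10)) % 10
      = (((e+1).choose i : Int) * (l.getD i 0 + l.getD (i+1) 0)) % 10 := by
    intro i
    rw [Int.mul_emod, Int.emod_emod_of_dvd _ dvd_rfl, ← Int.mul_emod]
  simp only [h2]
  rw [← Finset.sum_int_mod]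
  have h3 : ∑ i ∈ Finset.range (e+2), (((e+1).choose i : Int) * (l.getD i 0 + l.getD (i+1) 0))
      = pvS (e+2) l := by
    have := pascal_sum (e+1) (fun i => l.getD i 0)
    unfold pvS
    rw [← this]
  rw [h3]

theorem pvALoop_head (e : Nat) : ∀ (l : List Int), e + 2 ≤ l.length →
    (pvALoop l (e+2)).getD 0 0 = PySem.Int.mod (pvS (e+1) l) 10 := by
  induction e with
  | zero =>
    intro l hl
    show (pvAInner (pvAInner l 1) 0).getD 0 0 = _
    have h0 : ∀ x : List Int, pvAInner x 0 = x := by intro x; simp [pvAInner]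
    rw [h0]
    rw [pvAInner_getD l 1 (by omega) 0, if_pos (by omega)]
    unfold pvS
    simp [Finset.sum_range_succ]
  | succ e ih =>
    intro l hl
    show (pvALoop (pvAInner l (e+2)) (e+2)).getD 0 0 = _
    rw [ih (pvAInner l (e+2)) (by rw [pvAInner_length]; omega)]
    exact pvS_inner l e (by omega)

theorem pvBinomModGo_correct (p : Nat) (hp : p.Prime) (tbl : List (List Nat))
    (ht : ∀ a b : Nat, a < p → b < p → ((tbl.getD a []).getD b 0) = (a.choose b) % p) :
    ∀ m i r : Nat, r < p → pvBinomModGo r m i p tbl = (r * m.choose i) % p := by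
  haveI : Fact p.Prime := ⟨hp⟩
  have hp2 : 2 ≤ p := hp.two_le
  have main : ∀ n : Nat, ∀ m i r : Nat, m + i ≤ n → r < p →
      pvBinomModGo r m i p tbl = (r * m.choose i) % p := by
    intro n
    induction n with
    | zero =>
      intro m i r hn hr
      have hm : m = 0 := by omega
      have hi : i = 0 := by omega
      subst hm; subst hi
      rw [pvBinomModGo]
      simp [Nat.mod_eq_of_lt hr]
    | succ n ih =>
      intro m i r hn hr
      by_cases hmi : 0 < m ∨ 0 < i
      · rw [pvBinomModGo, dif_pos ⟨hp2, hmi⟩]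
        have hlt : m / p + i / p ≤ n := by
          have := Nat.div_le_self m p
          have := Nat.div_le_self i p
          rcases hmi with hm | hi
          · have := Nat.div_lt_self hm (by omega : 1 < p); omega
          · have := Nat.div_lt_self hi (by omega : 1 < p); omega
        rw [ht _ _ (Nat.mod_lt _ (by omega)) (Nat.mod_lt _ (by omega))]
        rw [ih _ _ _ hlt (Nat.mod_lt _ (by omega))]
        have lucas : m.choose i % p = ((m % p).choose (i % p) * (m / p).choose (i / p)) % p :=
          Choose.choose_modEq_choose_mod_mul_choose_div_nat (p := p)
        conv_rhs => rw [Nat.mul_mod, lucas, ← Nat.mul_mod, ← mul_assoc]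
        have h1 : r * ((m % p).choose (i % p) % p) % p ≡ r * (m % p).choose (i % p) [MOD p] :=
          (Nat.mod_modEq _ p).trans (Nat.ModEq.mul_left r (Nat.mod_modEq _ p))
        exact h1.mul_right ((m / p).choose (i / p))
      · have hm : m = 0 := by omega
        have hi : i = 0 := by omega
        subst hm; subst hi
        rw [pvBinomModGo]
        simp [Nat.mod_eq_of_lt hr]
  intro m i r hr
  exact main (m+i) m i r le_rfl hr

theorem pvCrt (c : Nat) : (6 * (c % 5) + 5 * (c % 2)) % 10 = c % 10 := by omega

theorem pvBinom10 (m i : Nat) :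
    (6 * pvBinomMod m i 5 pvT5 + 5 * pvBinomMod m i 2 pvT2) % 10 = m.choose i % 10 := by
  have h5 : pvBinomMod m i 5 pvT5 = m.choose i % 5 := by
    unfold pvBinomMod
    rw [pvBinomModGo_correct 5 (by norm_num) pvT5
      (by intro a b ha hb; interval_cases a <;> interval_cases b <;> decide) m i 1 (by norm_num), one_mul]
  have h2 : pvBinomMod m i 2 pvT2 = m.choose i % 2 := by
    unfold pvBinomMod
    rw [pvBinomModGo_correct 2 (by norm_num) pvT2
      (by intro a b ha hb; interval_cases a <;> interval_cases b <;> decide) m i 1 (by norm_num), one_mul]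
  rw [h5, h2, pvCrt]

theorem pvEnumMapSum (g : Int × Int → Int) : ∀ (l : List Int) (s : Int),
    ((PySem.List.enumerate l s).map g).sum
      = ∑ k ∈ Finset.range l.length, g ((s + (k : Int)), l.getD k 0) := by
  intro l
  induction l with
  | nil => intro s; simp [PySem.List.enumerate_nil]
  | cons x xs ih =>
    intro s
    rw [PySem.List.enumerate_cons]
    simp only [List.map_cons, List.sum_cons, ih (s+1), List.length_cons]
    rw [Finset.sum_range_succ' _ xs.length]
    simp only [List.getD_cons_succ, List.getD_cons_zero, Nat.cast_zero, Nat.cast_add, Nat.cast_one]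
    have : ∀ k : Nat, s + 1 + (k : Int) = s + ((k : Int) + 1) := by intro k; ring
    simp only [this]
    ring_nf

theorem pvAlt_eq (nums : List Int) (h : 2 ≤ nums.length) :
    triangularSum_brute_alt nums = PySem.Int.mod (pvS (nums.length - 1) nums) 10 := by
  have hne : ¬ nums.length = 1 := by omega
  unfold triangularSum_brute_alt
  rw [if_neg hne]
  simp only []
  rw [PySem.List.foldl_add (g := fun iv : Int × Int =>
    (((6 * pvBinomMod (nums.length - 1) iv.1.toNat 5 pvT5
        + 5 * pvBinomMod (nums.length - 1) iv.1.toNat 2 pvT2) % 10 : Nat) : Int) * iv.2)]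
  rw [pvEnumMapSum]
  simp only [zero_add, Int.toNat_natCast]
  have hmod : ∀ x : Int, PySem.Int.mod x 10 = x % 10 := fun x =>
    PySem.Int.mod_eq_emod_of_pos (by norm_num)
  rw [hmod, hmod]
  have h1 : ∑ k ∈ Finset.range nums.length,
      (((6 * pvBinomMod (nums.length - 1) k 5 pvT5
        + 5 * pvBinomMod (nums.length - 1) k 2 pvT2) % 10 : Nat) : Int) * nums.getD k 0
      = ∑ k ∈ Finset.range nums.length,
        ((((nums.length - 1).choose k % 10 : Nat) : Int) * nums.getD k 0) := by
    refine Finset.sum_congr rfl fun k _ => ?_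
    rw [pvBinom10]
  rw [h1]
  have hre : Finset.range nums.length = Finset.range ((nums.length - 1) + 1) := by
    congr 1; omega
  rw [hre]
  unfold pvS
  rw [Finset.sum_int_mod]
  have h2 : ∀ k : Nat, ((((nums.length - 1).choose k % 10 : Nat) : Int) * nums.getD k 0) % 10
      = (((nums.length - 1).choose k : Int) * nums.getD k 0) % 10 := by
    intro k
    push_cast
    rw [Int.mul_emod, Int.emod_emod_of_dvd _ dvd_rfl, ← Int.mul_emod]
  simp only [h2]
  rw [← Finset.sum_int_mod]

theorem pvA_big (nums : List Int) (h : 2 ≤ nums.length) :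
    triangularSum_brute nums = PySem.Int.mod (pvS (nums.length - 1) nums) 10 := by
  unfold triangularSum_brute
  have he : nums.length = (nums.length - 2) + 2 := by omega
  rw [show pvALoop nums nums.length = pvALoop nums ((nums.length - 2) + 2) from by rw [← he]]
  rw [pvALoop_head (nums.length - 2) nums (by omega)]
  congr 1
  have : nums.length - 2 + 1 = nums.length - 1 := by omega
  rw [this]

-- ===== VERDICT (by name: the statement is the Claim_ definition above) =====
theorem triangularSum_brute_spec : Claim_equal_triangularSum_brute := by
  intro nums _ hpre
  unfold Spec_triangularSum_brute
  have hlen : 1 ≤ nums.length := by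
    cases nums with
    | nil => exact absurd rfl hpre
    | cons x xs => simp
  by_cases h1 : nums.length = 1
  · unfold triangularSum_brute triangularSum_brute_alt
    rw [if_pos h1, h1]
    show (pvAInner (pvAInner nums 0) 0).getD 0 0 = _
    simp [pvAInner]
  · rw [pvA_big nums (by omega), pvAlt_eq nums (by omega)]
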